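-- pv_equiv track=rewrite | github.com/babyfox1306/Upwork-AI-Assistant | utils/validation.py | sanitize_job
-- ===== SOURCE A (Python) =====
-- from typing import Dict, List, Optional, Tuple
--
-- def sanitize_job(job_data: Dict) -> Dict:
--     """
--     Sanitize job data (trim strings, normalize types, set defaults)
--
--     Args:
--         job_data: Job dictionary to sanitize
--
--     Returns:
--         Sanitized job dictionary
--     """
--     sanitized = job_data.copy()
--
--     # Set default source nếu thiếu
--     if not sanitized.get('source'):
--         sanitized['source'] = 'Unknown'
--
--     # Trim string fields
--     string_fields = ['job_id', 'title', 'description', 'link', 'source', 'category', 'client_country']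
--     for field in string_fields:
--         if field in sanitized and isinstance(sanitized[field], str):
--             sanitized[field] = sanitized[field].strip()
--
--     # Limit description length (tự động truncate thay vì reject)
--     if 'description' in sanitized:
--         desc = sanitized.get('description', '')
--         if isinstance(desc, str) and len(desc) > 10000:
--             sanitized['description'] = desc[:10000] + '...'
--
--     # Limit title length
--     if 'title' in sanitized:
--         title = sanitized.get('title', '')
--         if isinstance(title, str) and len(title) > 500:
--             sanitized['title'] = title[:500]
--
--     return sanitized
-- ===== SOURCE B (Python) =====
-- # One pure pass over the dict's entries (data-driven) instead of A's three staged
-- # in-place passes driven by a schema list; the only mutation is appending the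
-- # 'source' default when the key is absent.
--
-- _STRIP_FIELDS = {'job_id', 'title', 'description', 'link', 'source', 'category', 'client_country'}
--
-- def _clean(field, value):
--     if field == 'source' and not value:
--         value = 'Unknown'
--     if not isinstance(value, str):
--         return value
--     if field in _STRIP_FIELDS:
--         value = value.strip()
--     if field == 'description' and len(value) > 10000:
--         value = value[:10000] + '...'
--     elif field == 'title' and len(value) > 500:
--         value = value[:500]
--     return value
--
-- def sanitize_job(job_data):
--     result = {field: _clean(field, value) for field, value in job_data.items()}
--     if 'source' not in result:
--         result['source'] = 'Unknown'
--     return result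
-- ===== Notes on version B (the rewrite author's own statement) =====
-- stated objective: simpler
-- what changed: B traverses the dict's entries once with a pure per-entry cleaning function (a comprehension building a fresh dict, plus one conditional append of the 'source' default), instead of A's three staged in-place mutation passes driven by a schema list of field names with repeated dict lookups.
import Mathlib
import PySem

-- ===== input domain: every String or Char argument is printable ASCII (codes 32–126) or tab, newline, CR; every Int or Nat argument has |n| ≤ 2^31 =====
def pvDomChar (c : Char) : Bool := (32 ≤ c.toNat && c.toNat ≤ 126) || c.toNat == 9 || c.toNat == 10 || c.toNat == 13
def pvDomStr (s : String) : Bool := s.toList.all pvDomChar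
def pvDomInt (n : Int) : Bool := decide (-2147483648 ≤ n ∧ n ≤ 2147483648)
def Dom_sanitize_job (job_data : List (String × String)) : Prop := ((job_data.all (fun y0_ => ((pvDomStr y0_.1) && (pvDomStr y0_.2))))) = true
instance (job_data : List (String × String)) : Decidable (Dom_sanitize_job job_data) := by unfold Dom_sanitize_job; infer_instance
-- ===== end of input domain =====

-- B replaces A's three schema-driven in-place passes over the dict by ONE pure pass over the
-- dict's entries (a comprehension with a per-entry cleaning function) plus a conditional
-- append of the 'source' default; equal return value (neither version mutates the argument).

-- ===== PORT A =====
def pvStringFields : List String :=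
  ["job_id", "title", "description", "link", "source", "category", "client_country"]

def sanitize_job (job_data : List (String × String)) : List (String × String) :=
  let s0 := PySem.Dict.ofList job_data
  -- if not sanitized.get('source'): sanitized['source'] = 'Unknown'   (falsy = missing or "")
  let s1 := if s0.getD "source" "" = "" then s0.insert "source" "Unknown" else s0
  let s2 := pvStringFields.foldl
      (fun d field => if d.contains field then d.insert field (PySem.Str.strip (d.getD field "")) else d) s1
  let s3 := if s2.contains "description" then
      (if (10000 : Int) < PySem.Str.len (s2.getD "description" "") then
         s2.insert "description" (PySem.Str.slice (s2.getD "description" "") none (some 10000) ++ "...")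
       else s2)
    else s2
  let s4 := if s3.contains "title" then
      (if (500 : Int) < PySem.Str.len (s3.getD "title" "") then
         s3.insert "title" (PySem.Str.slice (s3.getD "title" "") none (some 500))
       else s3)
    else s3
  s4.items

-- ===== PORT B =====
-- the set _STRIP_FIELDS (distinct elements)
def pvStripSet : List String :=
  ["job_id", "title", "description", "link", "source", "category", "client_country"]

-- _clean(field, value); values are strings on this domain, so the isinstance guard is trivially true
def pvClean (field v : String) : String :=
  let v0 := if field = "source" ∧ v = "" then "Unknown" else v
  let v1 := if pvStripSet.contains field then PySem.Str.strip v0 else v0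
  if field = "description" ∧ (10000 : Int) < PySem.Str.len v1 then
    PySem.Str.slice v1 none (some 10000) ++ "..."
  else if field = "title" ∧ (500 : Int) < PySem.Str.len v1 then
    PySem.Str.slice v1 none (some 500)
  else v1

def sanitize_job_alt (job_data : List (String × String)) : List (String × String) :=
  let d := PySem.Dict.ofList job_data
  -- result = {field: _clean(field, value) for field, value in job_data.items()}
  let result := PySem.Dict.mk (d.items.map (fun p => (p.1, pvClean p.1 p.2)))
  -- if 'source' not in result: result['source'] = 'Unknown'
  let result := if result.contains "source" then result else result.insert "source" "Unknown"
  result.items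

-- ===== PRECONDITION & SPEC =====
def Spec_sanitize_job (job_data : List (String × String)) (out : List (String × String)) : Prop := out = sanitize_job_alt job_data
instance (job_data : List (String × String)) (out : List (String × String)) : Decidable (Spec_sanitize_job job_data out) := by unfold Spec_sanitize_job; infer_instance

-- ===== CLAIM =====
def Claim_equal_sanitize_job : Prop := ∀ (job_data : List (String × String)), Dom_sanitize_job job_data → Spec_sanitize_job job_data (sanitize_job job_data)

-- ===== LEMMAS AND PROOFS =====

-- A's whole per-key effect (strip if a string field, then the two truncations), as one function
def pvT (f v : String) : String :=
  let v1 := if pvStringFields.contains f then PySem.Str.strip v else v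
  let v2 := if f = "description" ∧ (10000 : Int) < PySem.Str.len v1 then
      PySem.Str.slice v1 none (some 10000) ++ "..." else v1
  if f = "title" ∧ (500 : Int) < PySem.Str.len v2 then PySem.Str.slice v2 none (some 500) else v2

lemma pvLenStrip (s : String) : (PySem.Str.strip s).length = (PySem.Chars.strip s.toList).length := by
  simp [PySem.Str.strip]

-- an unconditional field update  d[k] = h(d[k])  (performed only when k is present)
def pvUpd (k : String) (h : String → String) (d : PySem.Dict String String) : PySem.Dict String String :=
  match d.get? k with
  | some v => d.insert k (h v)
  | none => d

lemma pvItems_upd (d : PySem.Dict String String) (hnd : d.keys.Nodup) (k : String) (h : String → String) :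
    (pvUpd k h d).items = d.items.map (fun p => if p.1 = k then (p.1, h p.2) else p) := by
  unfold pvUpd
  cases hk : d.get? k with
  | none =>
    have hmap : d.items.map (fun p => if p.1 = k then (p.1, h p.2) else p) = d.items.map id := by
      apply List.map_congr_left
      intro p hp
      by_cases hpk : p.1 = k
      · exfalso
        have hpm : (p.1, p.2) ∈ d.items := by simpa using hp
        have := PySem.Dict.get?_of_mem_items d hpm hnd
        rw [hpk, hk] at this
        simp at this
      · simp [hpk]
    rw [hmap, List.map_id]
  | some v =>
    have hc : d.contains k = true := by
      rw [PySem.Dict.contains_eq_isSome_get?, hk]; rfl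
    rw [PySem.Dict.items_insert_of_contains d (h v) hc]
    apply List.map_congr_left
    intro p hp
    by_cases hpk : p.1 = k
    · have hpm : (p.1, p.2) ∈ d.items := by simpa using hp
      have hv := PySem.Dict.get?_of_mem_items d hpm hnd
      rw [hpk, hk] at hv
      have hv2 : v = p.2 := by injection hv
      subst hv2
      simp [hpk]
    · simp [hpk]

lemma pvKeys_of_items_map (e d : PySem.Dict String String) (k : String) (h : String → String)
    (he : e.items = d.items.map (fun p => if p.1 = k then (p.1, h p.2) else p)) :
    e.keys = d.keys := by
  have : e.items.map Prod.fst = d.items.map Prod.fst := by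
    rw [he, List.map_map]
    apply List.map_congr_left
    intro p hp
    by_cases hpk : p.1 = k <;> simp [hpk]
  simpa [PySem.Dict.keys] using this

lemma pvItems_foldl_upd (ops : List (String × (String → String)))
    (d : PySem.Dict String String) (hnd : d.keys.Nodup) :
    (ops.foldl (fun d op => pvUpd op.1 op.2 d) d).items
      = d.items.map (fun p => (p.1, ops.foldl (fun v op => if p.1 = op.1 then op.2 v else v) p.2)) := by
  induction ops generalizing d with
  | nil => simp
  | cons op ops ih =>
    have hkeys : (pvUpd op.1 op.2 d).keys = d.keys :=
      pvKeys_of_items_map _ d op.1 op.2 (pvItems_upd d hnd op.1 op.2)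
    have hnd' : (pvUpd op.1 op.2 d).keys.Nodup := by rw [hkeys]; exact hnd
    rw [List.foldl_cons, ih _ hnd', pvItems_upd d hnd op.1 op.2, List.map_map]
    apply List.map_congr_left
    intro p hp
    by_cases hpk : p.1 = op.1 <;> simp [hpk]

-- A's conditional truncation step, expressed as the same itemwise map
lemma pvItems_trunc (d : PySem.Dict String String) (hnd : d.keys.Nodup) (k : String)
    (c : String → Prop) [DecidablePred c] (f : String → String) :
    (if d.contains k then (if c (d.getD k "") then d.insert k (f (d.getD k "")) else d) else d).items
      = d.items.map (fun p => if p.1 = k then (p.1, if c p.2 then f p.2 else p.2) else p) := by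
  cases hk : d.get? k with
  | none =>
    have hc : d.contains k = false := by
      rw [PySem.Dict.contains_eq_isSome_get?, hk]; rfl
    rw [hc]
    have hmap : d.items.map (fun p => if p.1 = k then (p.1, if c p.2 then f p.2 else p.2) else p)
        = d.items.map id := by
      apply List.map_congr_left
      intro p hp
      by_cases hpk : p.1 = k
      · exfalso
        have hpm : (p.1, p.2) ∈ d.items := by simpa using hp
        have := PySem.Dict.get?_of_mem_items d hpm hnd
        rw [hpk, hk] at this
        simp at this
      · simp [hpk]
    simp [hmap]
  | some v =>
    have hc : d.contains k = true := by
      rw [PySem.Dict.contains_eq_isSome_get?, hk]; rfl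
    have hgd : d.getD k "" = v := by rw [PySem.Dict.getD_eq_get?_getD, hk]; rfl
    rw [hc, if_pos rfl, hgd]
    by_cases hcv : c v
    · rw [if_pos hcv, PySem.Dict.items_insert_of_contains d (f v) hc]
      apply List.map_congr_left
      intro p hp
      by_cases hpk : p.1 = k
      · have hpm : (p.1, p.2) ∈ d.items := by simpa using hp
        have hv := PySem.Dict.get?_of_mem_items d hpm hnd
        rw [hpk, hk] at hv
        have hv2 : v = p.2 := by injection hv
        subst hv2
        simp [hpk, hcv]
      · simp [hpk]
    · rw [if_neg hcv]
      have hmap : d.items.map (fun p => if p.1 = k then (p.1, if c p.2 then f p.2 else p.2) else p)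
          = d.items.map id := by
        apply List.map_congr_left
        intro p hp
        by_cases hpk : p.1 = k
        · have hpm : (p.1, p.2) ∈ d.items := by simpa using hp
          have hv := PySem.Dict.get?_of_mem_items d hpm hnd
          rw [hpk, hk] at hv
          have hv2 : v = p.2 := by injection hv
          subst hv2
          simp [hpk, hcv]
          rw [← hpk]
        · simp [hpk]
      simp [hmap]

-- A's core (strip loop + the two truncations), after the 'source' defaulting, is an itemwise map of pvT
lemma pvA_items (d : PySem.Dict String String) (hnd : d.keys.Nodup) :
    (let s2 := pvStringFields.foldl
        (fun d field => if d.contains field then d.insert field (PySem.Str.strip (d.getD field "")) else d) d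
     let s3 := if s2.contains "description" then
        (if (10000 : Int) < PySem.Str.len (s2.getD "description" "") then
           s2.insert "description" (PySem.Str.slice (s2.getD "description" "") none (some 10000) ++ "...")
         else s2)
       else s2
     let s4 := if s3.contains "title" then
        (if (500 : Int) < PySem.Str.len (s3.getD "title" "") then
           s3.insert "title" (PySem.Str.slice (s3.getD "title" "") none (some 500))
         else s3)
       else s3
     s4.items)
    = d.items.map (fun p => (p.1, pvT p.1 p.2)) := by
  have hbody : (fun (d : PySem.Dict String String) (field : String) =>
      if d.contains field then d.insert field (PySem.Str.strip (d.getD field "")) else d)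
      = fun d field => pvUpd field PySem.Str.strip d := by
    funext d f
    unfold pvUpd
    cases hk : d.get? f with
    | none =>
      have hc : d.contains f = false := by rw [PySem.Dict.contains_eq_isSome_get?, hk]; rfl
      rw [hc]; rfl
    | some v =>
      have hc : d.contains f = true := by rw [PySem.Dict.contains_eq_isSome_get?, hk]; rfl
      have hgd : d.getD f "" = v := by rw [PySem.Dict.getD_eq_get?_getD, hk]; rfl
      rw [hc, if_pos rfl, hgd]
  rw [hbody]
  have hA2 : pvStringFields.foldl (fun d field => pvUpd field PySem.Str.strip d) d
      = (pvStringFields.map (fun f => (f, PySem.Str.strip))).foldl (fun d op => pvUpd op.1 op.2 d) d := by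
    rw [List.foldl_map]
  simp only [hA2]
  set s2 := (pvStringFields.map (fun f => (f, PySem.Str.strip))).foldl (fun d op => pvUpd op.1 op.2 d) d with hs2
  have hitems2 : s2.items = d.items.map (fun p =>
      (p.1, (pvStringFields.map (fun f => (f, PySem.Str.strip))).foldl
              (fun v op => if p.1 = op.1 then op.2 v else v) p.2)) :=
    pvItems_foldl_upd _ d hnd
  have hkeys2 : s2.keys = d.keys := by
    have : s2.items.map Prod.fst = d.items.map Prod.fst := by
      rw [hitems2, List.map_map]; rfl
    simpa [PySem.Dict.keys] using this
  have hnd2 : s2.keys.Nodup := by rw [hkeys2]; exact hnd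
  have hitems3 := pvItems_trunc s2 hnd2 "description"
      (fun v => (10000 : Int) < PySem.Str.len v)
      (fun v => PySem.Str.slice v none (some 10000) ++ "...")
  set s3 := (if s2.contains "description" then
      (if (10000 : Int) < PySem.Str.len (s2.getD "description" "") then
         s2.insert "description" (PySem.Str.slice (s2.getD "description" "") none (some 10000) ++ "...")
       else s2)
     else s2) with hs3
  have hkeys3 : s3.keys = s2.keys := pvKeys_of_items_map s3 s2 "description"
      (fun v => if (10000 : Int) < PySem.Str.len v then PySem.Str.slice v none (some 10000) ++ "..." else v)
      hitems3
  have hnd3 : s3.keys.Nodup := by rw [hkeys3]; exact hnd2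
  have hitems4 := pvItems_trunc s3 hnd3 "title"
      (fun v => (500 : Int) < PySem.Str.len v)
      (fun v => PySem.Str.slice v none (some 500))
  rw [hitems4, hitems3, hitems2, List.map_map, List.map_map]
  apply List.map_congr_left
  intro p hp
  by_cases h1 : p.1 = "job_id"
  · simp [pvStringFields, pvT, h1]
  by_cases h2 : p.1 = "title"
  · simp [pvStringFields, pvT, h2, pvLenStrip]
  by_cases h3 : p.1 = "description"
  · simp [pvStringFields, pvT, h3, pvLenStrip]
  by_cases h4 : p.1 = "link"
  · simp [pvStringFields, pvT, h4]
  by_cases h5 : p.1 = "source"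
  · simp [pvStringFields, pvT, h5]
  by_cases h6 : p.1 = "category"
  · simp [pvStringFields, pvT, h6]
  by_cases h7 : p.1 = "client_country"
  · simp [pvStringFields, pvT, h7]
  · simp [pvStringFields, pvT, h1, h2, h3, h4, h5, h6, h7]

-- B's cleaner agrees with A's per-key effect whenever the 'source' default does not fire
lemma pvClean_eq_pvT (f v : String) (h : ¬ (f = "source" ∧ v = "")) : pvClean f v = pvT f v := by
  by_cases hd : f = "description"
  · subst hd; simp [pvClean, pvT, pvStripSet, pvStringFields]
  by_cases ht : f = "title"
  · subst ht; simp [pvClean, pvT, pvStripSet, pvStringFields]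
  · simp [pvClean, pvT, pvStripSet, pvStringFields, h, hd, ht]

lemma pvContains_mapped (d : PySem.Dict String String) (k : String) :
    (PySem.Dict.mk (d.items.map (fun p => (p.1, pvClean p.1 p.2)))).contains k = d.contains k := by
  simp [PySem.Dict.contains, List.any_map, Function.comp_def]

set_option maxHeartbeats 1000000 in
lemma pvMain (job_data : List (String × String)) :
    sanitize_job job_data = sanitize_job_alt job_data := by
  have hnd0 : (PySem.Dict.ofList job_data).keys.Nodup :=
    PySem.Dict.nodup_keys_ofList job_data
  simp only [sanitize_job, sanitize_job_alt]
  set d0 := PySem.Dict.ofList job_data with hd0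
  have hconB := pvContains_mapped d0 "source"
  by_cases h : d0.getD "source" "" = ""
  · rw [if_pos h]
    by_cases hc : d0.contains "source" = true
    · -- 'source' present with value "" : in-place overwrite on A's side, the default fires inside pvClean on B's side
      have hnd1 : (d0.insert "source" "Unknown").keys.Nodup := PySem.Dict.nodup_keys_insert _ _ _ hnd0
      rw [pvA_items _ hnd1, PySem.Dict.items_insert_of_contains d0 _ hc]
      rw [hconB]
      rw [if_pos hc]
      show _ = d0.items.map (fun p => (p.1, pvClean p.1 p.2))
      rw [List.map_map]
      apply List.map_congr_left
      rintro ⟨pk, pv⟩ hp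
      simp only [Function.comp_def]
      by_cases hpk : pk = "source"
      · subst hpk
        have hg : d0.get? "source" = some pv := PySem.Dict.get?_of_mem_items d0 hp hnd0
        have hv : d0.getD "source" "" = pv := by rw [PySem.Dict.getD_eq_get?_getD, hg]; rfl
        have hv2 : pv = "" := by rw [← hv, h]
        subst hv2
        decide
      · have hne : (pk == "source") = false := by simp [hpk]
        simp only [hne, Bool.false_eq_true, if_false]
        rw [pvClean_eq_pvT _ _ (by tauto)]
    · -- 'source' missing: both sides append ("source", "Unknown") at the end
      have hcf : d0.contains "source" = false := by simpa using hc
      have hnd1 : (d0.insert "source" "Unknown").keys.Nodup := PySem.Dict.nodup_keys_insert _ _ _ hnd0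
      rw [pvA_items _ hnd1, PySem.Dict.items_insert_of_not_contains d0 _ hcf]
      rw [hconB]
      rw [if_neg (by simp [hcf])]
      rw [PySem.Dict.items_insert_of_not_contains _ _ (hconB.trans hcf)]
      show _ = d0.items.map (fun p => (p.1, pvClean p.1 p.2)) ++ [("source", "Unknown")]
      rw [List.map_append]
      have hlast : ([("source", "Unknown")] : List (String × String)).map (fun p => (p.1, pvT p.1 p.2)) = [("source", "Unknown")] := by decide
      rw [hlast]
      congr 1
      apply List.map_congr_left
      rintro ⟨pk, pv⟩ hp
      have hpk : pk ≠ "source" := by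
        intro hpk
        subst hpk
        have hg : d0.get? "source" = some pv := PySem.Dict.get?_of_mem_items d0 hp hnd0
        rw [PySem.Dict.contains_eq_isSome_get?, hg] at hcf
        exact absurd hcf (by simp)
      show (pk, pvT pk pv) = (pk, pvClean pk pv)
      rw [pvClean_eq_pvT _ _ (by tauto)]
  · -- 'source' present and non-empty: no defaulting anywhere
    rw [if_neg h]
    have hc : d0.contains "source" = true := by
      by_contra hcf
      have hcf2 : d0.contains "source" = false := by simpa using hcf
      exact h (PySem.Dict.getD_of_not_contains d0 "" hcf2)
    rw [pvA_items _ hnd0]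
    rw [hconB]
    rw [if_pos hc]
    show _ = d0.items.map (fun p => (p.1, pvClean p.1 p.2))
    apply List.map_congr_left
    rintro ⟨pk, pv⟩ hp
    by_cases hpk : pk = "source"
    · subst hpk
      have hg : d0.get? "source" = some pv := PySem.Dict.get?_of_mem_items d0 hp hnd0
      have hv : d0.getD "source" "" = pv := by rw [PySem.Dict.getD_eq_get?_getD, hg]; rfl
      have hv2 : pv ≠ "" := fun he => h (by rw [hv, he])
      show ("source", pvT "source" pv) = ("source", pvClean "source" pv)
      rw [pvClean_eq_pvT _ _ (by tauto)]
    · show (pk, pvT pk pv) = (pk, pvClean pk pv)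
      rw [pvClean_eq_pvT _ _ (by tauto)]

-- ===== VERDICT =====
theorem sanitize_job_spec : Claim_equal_sanitize_job := by
  intro job_data _
  unfold Spec_sanitize_job
  exact pvMain job_data
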